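-- pv_equiv track=rewrite | github.com/f1r3k3rn/codeforces | contests/992/A.py | solve
-- ===== SOURCE A (Python) =====
-- def solve(n,k, vet):
--
--     sol  = ""
--     z = 0
--
--     for i in range(n):
--         sol = "NO"
--
--         for j in range(n):
--             if i != j and abs(vet[i] - vet[j]) % k == 0:
--                 sol = "YES"
--                 break
--
--         if sol == "NO":
--             k = i + 1
--             break
--
--     if sol == "NO":
--         return "YES" + "\n" + str(k)
--     else:
--         return "NO"
-- ===== SOURCE B (Python) =====
-- def solve(n, k, vet):
--     # Count residues mod k once in a dict, then report the first element
--     # whose residue class is a singleton (it has no mod-k congruent partner).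
--     if n <= 0:
--         return "NO"
--     pref = vet[:n]
--     cnt = {}
--     for v in pref:
--         r = v % k
--         cnt[r] = cnt.get(r, 0) + 1
--     for i, v in enumerate(pref):
--         if cnt[v % k] == 1:
--             return "YES\n" + str(i + 1)
--     return "NO"
-- ===== Notes on version B (the rewrite author's own statement) =====
-- stated objective: alternative
-- what changed: Replaced the nested per-element partner scan by a dictionary of residue counts mod k built in one pass, after which a single scan reports the first element whose residue count is 1.
-- outside the precondition, e.g. on solve(1, 0, [5]): A returns 'YES\n1', B raises ZeroDivisionError; on solve(1, 7, []): A returns 'YES\n1', B returns 'NO'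
import Mathlib
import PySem

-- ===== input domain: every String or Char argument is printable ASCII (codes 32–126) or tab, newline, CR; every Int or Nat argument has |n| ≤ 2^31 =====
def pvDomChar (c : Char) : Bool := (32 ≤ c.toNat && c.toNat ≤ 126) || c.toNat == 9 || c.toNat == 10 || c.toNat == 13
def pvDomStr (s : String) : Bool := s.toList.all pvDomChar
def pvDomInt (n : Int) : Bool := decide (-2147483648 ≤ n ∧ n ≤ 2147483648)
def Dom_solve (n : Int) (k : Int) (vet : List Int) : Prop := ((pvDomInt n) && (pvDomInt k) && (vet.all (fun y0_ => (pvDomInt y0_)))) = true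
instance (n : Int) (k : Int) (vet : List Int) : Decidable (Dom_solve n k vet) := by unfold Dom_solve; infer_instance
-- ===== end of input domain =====

-- B: instead of A's nested partner scan, build a dictionary of residue counts mod k once
-- and report the first element whose residue class is a singleton (alternative algorithm).

-- ===== PORT A =====
-- inner loop: for j in range(n): if i != j and abs(vet[i]-vet[j]) % k == 0: sol = "YES"; break
def solveAInner (vet : List Int) (k : Int) (i : Int) : List Int → String
  | [] => "NO"
  | j :: js =>
      if i ≠ j ∧ PySem.Int.mod |PySem.List.pyGetD vet i 0 - PySem.List.pyGetD vet j 0| k = 0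
      then "YES"
      else solveAInner vet k i js

-- outer loop: carries (sol, k); on break returns (sol, i+1) (the Python sets k = i+1 there)
def solveAOuter (vet : List Int) (n : Int) (k : Int) (sol : String) : List Int → String × Int
  | [] => (sol, k)
  | i :: is =>
      let sol' := solveAInner vet k i (PySem.List.pyRange 0 n 1)
      if sol' = "NO" then (sol', i + 1) else solveAOuter vet n k sol' is

def solve (n : Int) (k : Int) (vet : List Int) : String :=
  let r := solveAOuter vet n k "" (PySem.List.pyRange 0 n 1)
  if r.1 = "NO" then "YES" ++ "\n" ++ PySem.Int.toStr r.2 else "NO"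

-- ===== PORT B =====
def solveBLoop (k : Int) (cnt : PySem.Dict Int Int) : List (Int × Int) → String
  | [] => "NO"
  | (i, v) :: rest =>
      if cnt.getD (PySem.Int.mod v k) 0 = 1
      then "YES" ++ "\n" ++ PySem.Int.toStr (i + 1)
      else solveBLoop k cnt rest

def solve_alt (n : Int) (k : Int) (vet : List Int) : String :=
  if n ≤ 0 then "NO"
  else
    let pref := PySem.List.slice vet none (some n)
    let cnt := pref.foldl
      (fun d v => d.insert (PySem.Int.mod v k) (d.getD (PySem.Int.mod v k) 0 + 1))
      PySem.Dict.empty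
    solveBLoop k cnt (PySem.List.enumerate pref 0)

-- ===== PRECONDITION & SPEC =====
-- Pre_ excludes k = 0 with 0 < n (B's residue computation v % 0 raises ZeroDivisionError, as A
-- itself does for n ≥ 2) and the malformed n > len(vet) (A raises IndexError for n ≥ 2, and for
-- n = 1 returns "YES\n1" without ever reading vet while B naturally answers "NO" on no elements).
def Pre_solve (n : Int) (k : Int) (vet : List Int) : Prop :=
  n ≤ (vet.length : Int) ∧ (n ≤ 0 ∨ k ≠ 0)
instance (n : Int) (k : Int) (vet : List Int) : Decidable (Pre_solve n k vet) := by
  unfold Pre_solve; infer_instance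

def pvWitness_solve : Int × Int × List Int := (3, 3, [1, 8, 2])

def Spec_solve (n : Int) (k : Int) (vet : List Int) (out : String) : Prop := out = solve_alt n k vet
instance (n : Int) (k : Int) (vet : List Int) (out : String) : Decidable (Spec_solve n k vet out) := by
  unfold Spec_solve; infer_instance

-- ===== CLAIM (what is proved, stated in full; the proofs are below) =====
def Claim_equal_solve : Prop := ∀ (n : Int) (k : Int) (vet : List Int), Dom_solve n k vet → Pre_solve n k vet → Spec_solve n k vet (solve n k vet)

-- ===== LEMMAS AND PROOFS =====

theorem pvWitness_ok : Dom_solve pvWitness_solve.1 pvWitness_solve.2.1 pvWitness_solve.2.2 ∧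
    Pre_solve pvWitness_solve.1 pvWitness_solve.2.1 pvWitness_solve.2.2 := by
  constructor <;> decide

-- residues mod k agree iff k divides the difference
theorem mod_eq_mod_iff_dvd (k a b : Int) (hk : k ≠ 0) :
    PySem.Int.mod a k = PySem.Int.mod b k ↔ k ∣ (a - b) := by
  have ha := PySem.Int.floordiv_mul_add_mod a k
  have hb := PySem.Int.floordiv_mul_add_mod b k
  constructor
  · intro h
    exact ⟨PySem.Int.floordiv a k - PySem.Int.floordiv b k, by linear_combination hb - ha + h⟩
  · rintro ⟨c, hc⟩
    have hd : |k| ∣ (PySem.Int.mod a k - PySem.Int.mod b k) := by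
      rw [abs_dvd]
      exact ⟨c - PySem.Int.floordiv a k + PySem.Int.floordiv b k, by linear_combination hc + ha - hb⟩
    have hzero : PySem.Int.mod a k - PySem.Int.mod b k = 0 := by
      apply Int.eq_zero_of_abs_lt_dvd hd
      rcases lt_or_gt_of_ne hk with hneg | hpos
      · have b1 := PySem.Int.mod_neg_bounds a hneg
        have b2 := PySem.Int.mod_neg_bounds b hneg
        rw [abs_of_neg hneg, abs_lt]; omega
      · have b1l := PySem.Int.mod_nonneg a hpos
        have b1r := PySem.Int.mod_lt a hpos
        have b2l := PySem.Int.mod_nonneg b hpos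
        have b2r := PySem.Int.mod_lt b hpos
        rw [abs_of_pos hpos, abs_lt]; omega
    omega

-- A's inner loop in closed form
theorem innerA_eq (vet : List Int) (k i : Int) (l : List Int) :
    solveAInner vet k i l =
      (if ∃ j ∈ l, i ≠ j ∧ PySem.Int.mod |PySem.List.pyGetD vet i 0 - PySem.List.pyGetD vet j 0| k = 0
       then "YES" else "NO") := by
  induction l with
  | nil => simp [solveAInner]
  | cons j js ih =>
    by_cases h : i ≠ j ∧ PySem.Int.mod |PySem.List.pyGetD vet i 0 - PySem.List.pyGetD vet j 0| k = 0
    · simp [solveAInner, h]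
    · simp only [solveAInner, if_neg h, ih, List.exists_mem_cons_iff]
      simp [h]

-- countP over range m is 1 iff the (given) witness position t0 is the only one
theorem countP_range_eq_one_iff (P : Nat → Bool) (m t0 : Nat) (ht0 : t0 < m) (hP : P t0 = true) :
    (List.range m).countP P = 1 ↔ ∀ t, t < m → t ≠ t0 → ¬ P t = true := by
  have hmem : t0 ∈ List.range m := List.mem_range.mpr ht0
  have hperm := List.perm_cons_erase hmem
  have h1 : (List.range m).countP P = ((List.range m).erase t0).countP P + 1 := by
    rw [hperm.countP_eq]
    simp [hP]
  rw [h1]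
  constructor
  · intro h t htm hne
    have h0 : ((List.range m).erase t0).countP P = 0 := by omega
    exact List.countP_eq_zero.mp h0 t
      ((List.Nodup.mem_erase_iff List.nodup_range).mpr ⟨hne, List.mem_range.mpr htm⟩)
  · intro h
    have h0 : ((List.range m).erase t0).countP P = 0 := by
      apply List.countP_eq_zero.mpr
      intro t htmem
      obtain ⟨hne, hmem'⟩ := (List.Nodup.mem_erase_iff List.nodup_range).mp htmem
      exact h t (List.mem_range.mp hmem') hne
    omega

-- B's dictionary holds the residue counts of the prefix
theorem cnt_getD (k : Int) (pref : List Int) (r : Int) :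
    (pref.foldl
        (fun d v => d.insert (PySem.Int.mod v k) (d.getD (PySem.Int.mod v k) 0 + 1))
        PySem.Dict.empty).getD r 0
      = ((pref.map (fun v => PySem.Int.mod v k)).count r : Int) := by
  rw [← List.foldl_map (f := fun v => PySem.Int.mod v k)
        (g := fun (d : PySem.Dict Int Int) x => d.insert x (d.getD x 0 + 1)),
      PySem.Dict.getD_foldl_insert_add_one]
  simp

theorem take_eq_range_map (vet : List Int) (m : Nat) (hm : m ≤ vet.length) :
    vet.take m = (List.range m).map (fun (t : Nat) => PySem.List.pyGetD vet (t : Int) 0) := by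
  apply List.ext_getElem
  · simp [hm]
  · intro i h1 h2
    have hi : i < vet.length := by simp at h1; omega
    simp only [List.getElem_take, List.getElem_map, List.getElem_range]
    rw [PySem.List.pyGetD_eq_getElem vet 0 (Int.natCast_nonneg _) (by exact_mod_cast hi)]
    simp

-- a mod-k congruent partner of position i exists iff the residue count of vet[i] is not 1
theorem exists_partner_iff (vet : List Int) (n k i : Int) (hk : k ≠ 0)
    (hn : n ≤ (vet.length : Int)) (h0 : 0 ≤ i) (hi : i < n) :
    (∃ j ∈ PySem.List.pyRange 0 n 1, i ≠ j ∧
        PySem.Int.mod |PySem.List.pyGetD vet i 0 - PySem.List.pyGetD vet j 0| k = 0)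
    ↔ ((vet.take n.toNat).map (fun v => PySem.Int.mod v k)).count
        (PySem.Int.mod (PySem.List.pyGetD vet i 0) k) ≠ 1 := by
  have hm : n.toNat ≤ vet.length := by omega
  set r := PySem.Int.mod (PySem.List.pyGetD vet i 0) k with hr
  set P : Nat → Bool := fun t => PySem.Int.mod (PySem.List.pyGetD vet (t : Int) 0) k == r
    with hPdef
  have hcount : ((vet.take n.toNat).map (fun v => PySem.Int.mod v k)).count r
      = (List.range n.toNat).countP P := by
    rw [take_eq_range_map vet n.toNat hm, List.count_eq_countP, List.map_map, List.countP_map]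
    rfl
  have ht0 : i.toNat < n.toNat := by omega
  have hcasti : ((i.toNat : Int)) = i := Int.toNat_of_nonneg h0
  have hP0 : P i.toNat = true := by
    rw [hPdef]
    simp only [hcasti, hr, beq_self_eq_true]
  rw [hcount, Ne, countP_range_eq_one_iff P n.toNat i.toNat ht0 hP0]
  constructor
  · rintro ⟨j, hjmem, hne, hmod⟩ hall
    obtain ⟨hj0, hjn⟩ := (PySem.List.mem_pyRange_one).mp hjmem
    have hcastj : ((j.toNat : Int)) = j := Int.toNat_of_nonneg hj0
    have hdvd : k ∣ (PySem.List.pyGetD vet i 0 - PySem.List.pyGetD vet j 0) :=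
      (dvd_abs _ _).mp ((PySem.Int.mod_eq_zero_iff_dvd _ _).mp hmod)
    have hPj : P j.toNat = true := by
      rw [hPdef]
      simp only [hcastj, beq_iff_eq, hr]
      exact ((mod_eq_mod_iff_dvd k _ _ hk).mpr hdvd).symm
    exact hall j.toNat (by omega) (by omega) hPj
  · intro h
    by_contra hno
    push_neg at hno
    apply h
    intro t htm hne hPt
    have hres : PySem.Int.mod (PySem.List.pyGetD vet (t : Int) 0) k = r := by
      rw [hPdef] at hPt
      exact beq_iff_eq.mp hPt
    have hdvd : k ∣ (PySem.List.pyGetD vet i 0 - PySem.List.pyGetD vet (t : Int) 0) := by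
      apply (mod_eq_mod_iff_dvd k _ _ hk).mp
      rw [hres, hr]
    exact hno (t : Int) (PySem.List.mem_pyRange_one.mpr ⟨by positivity, by omega⟩)
      (by omega)
      ((PySem.Int.mod_eq_zero_iff_dvd _ _).mpr ((dvd_abs _ _).mpr hdvd))

-- the two loops agree on every suffix of the index range
theorem outer_loop_eq (vet : List Int) (n k : Int) (cnt : PySem.Dict Int Int) (hk : k ≠ 0)
    (hn : n ≤ (vet.length : Int))
    (hcnt : ∀ r, cnt.getD r 0
        = (((vet.take n.toNat).map (fun v => PySem.Int.mod v k)).count r : Int)) :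
    ∀ (c : Nat) (a : Int) (sol0 : String), sol0 ≠ "NO" → 0 ≤ a → a + c = n →
    (if (solveAOuter vet n k sol0 (PySem.List.pyRange a n 1)).1 = "NO"
     then "YES" ++ "\n" ++ PySem.Int.toStr (solveAOuter vet n k sol0 (PySem.List.pyRange a n 1)).2
     else "NO")
    = solveBLoop k cnt (PySem.List.enumerate ((vet.take n.toNat).drop a.toNat) a) := by
  intro c
  induction c with
  | zero =>
    intro a sol0 hsol ha0 hac
    have han : a = n := by omega
    have hdrop : (vet.take n.toNat).drop a.toNat = [] := by
      apply List.drop_eq_nil_of_le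
      simp
      omega
    rw [PySem.List.pyRange_one_eq_nil (le_of_eq han.symm), hdrop]
    simp [solveAOuter, solveBLoop, PySem.List.enumerate, hsol]
  | succ c ih =>
    intro a sol0 hsol ha0 hac
    have haln : a < n := by omega
    have hlen : (vet.take n.toNat).length = n.toNat := by simp; omega
    have hanat : a.toNat < (vet.take n.toNat).length := by omega
    rw [PySem.List.pyRange_one_cons haln]
    rw [List.drop_eq_getElem_cons hanat, PySem.List.enumerate_cons]
    have hga : (vet.take n.toNat)[a.toNat] = PySem.List.pyGetD vet a 0 := by
      rw [List.getElem_take, PySem.List.pyGetD_eq_getElem vet 0 ha0 (by omega)]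
    have htest : (solveAInner vet k a (PySem.List.pyRange 0 n 1) = "NO")
        ↔ (cnt.getD (PySem.Int.mod ((vet.take n.toNat)[a.toNat]) k) 0 = 1) := by
      rw [innerA_eq, hga, hcnt]
      by_cases hex : ∃ j ∈ PySem.List.pyRange 0 n 1, a ≠ j ∧
          PySem.Int.mod |PySem.List.pyGetD vet a 0 - PySem.List.pyGetD vet j 0| k = 0
      · rw [if_pos hex]
        have hne1 := (exists_partner_iff vet n k a hk hn ha0 haln).mp hex
        exact iff_of_false (by decide) (fun hcast => hne1 (by exact_mod_cast hcast))
      · rw [if_neg hex]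
        have h1 : ((vet.take n.toNat).map (fun v => PySem.Int.mod v k)).count
            (PySem.Int.mod (PySem.List.pyGetD vet a 0) k) = 1 := by
          by_contra hc
          exact hex ((exists_partner_iff vet n k a hk hn ha0 haln).mpr hc)
        exact iff_of_true rfl (by exact_mod_cast h1)
    by_cases hcase : solveAInner vet k a (PySem.List.pyRange 0 n 1) = "NO"
    · have hc2 := htest.mp hcase
      simp only [solveAOuter, solveBLoop, hcase, if_pos hc2]
      simp
    · have hc2 : ¬ (cnt.getD (PySem.Int.mod ((vet.take n.toNat)[a.toNat]) k) 0 = 1) :=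
        fun hx => hcase (htest.mpr hx)
      have hstep : (a + 1).toNat = a.toNat + 1 := by omega
      simp only [solveAOuter, solveBLoop, if_neg hcase, if_neg hc2]
      rw [← hstep]
      exact ih (a + 1) _ hcase (by omega) (by omega)

-- ===== VERDICT (by name: the statement is the Claim_ definition above) =====
theorem solve_spec : Claim_equal_solve := by
  intro n k vet _hdom hpre
  obtain ⟨hlen, hk0⟩ := hpre
  unfold Spec_solve solve solve_alt
  by_cases hn : n ≤ 0
  · rw [PySem.List.pyRange_one_eq_nil hn, if_pos hn]
    simp [solveAOuter]
  · push_neg at hn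
    have hk : k ≠ 0 := hk0.resolve_left (by omega)
    rw [if_neg (show ¬ n ≤ 0 by omega)]
    rw [PySem.List.slice_to vet (by omega)]
    have hmain := outer_loop_eq vet n k
      ((vet.take n.toNat).foldl
        (fun d v => d.insert (PySem.Int.mod v k) (d.getD (PySem.Int.mod v k) 0 + 1))
        PySem.Dict.empty) hk hlen
      (fun r => cnt_getD k (vet.take n.toNat) r)
      n.toNat 0 "" (by decide) (by omega) (by omega)
    simpa using hmain
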